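-- pv_equiv track=rewrite | github.com/SIDHANT-SIN/Automatic-Grading-System | main.py | extract_roll_number
-- ===== SOURCE A (Python) =====
-- def extract_roll_number(text):
--     replacements = {
--         'O': '0', 'o': '0', 'Q': '0',
--         'T': '1', 'l': '1', 'I': '1', 'F':'7'
--     }
--     idx = text.find("in words")
--     if idx == -1 or idx < 1:
--         return None
--
--     start_idx = idx - 1
--     digits = []
--     i = start_idx - 1
--     while i >= 0 and len(digits) < 3:
--         ch = text[i]
--         if ch == '.':
--             i -= 1
--             continue
--         ch = replacements.get(ch, ch)
--         if ch.isdigit():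
--             digits.insert(0, ch)
--         i -= 1
--
--     return ''.join(digits)
-- ===== SOURCE B (Python) =====
-- def extract_roll_number(text):
--     replacements = {
--         'O': '0', 'o': '0', 'Q': '0',
--         'T': '1', 'l': '1', 'I': '1', 'F': '7'
--     }
--     idx = text.find("in words")
--     if idx < 1:
--         return None
--     digits = [c for c in (replacements.get(ch, ch) for ch in text[:idx - 1])
--               if c.isdigit()]
--     return ''.join(digits[-3:])
-- ===== Notes on version B (the rewrite author's own statement) =====
-- stated objective: simpler
-- what changed: Replaces A's backward while-loop with index arithmetic, a skip-continue branch, front-insertion and an early stop at 3 digits by a single forward comprehension over the prefix (map through the same replacement table, keep digit characters) followed by a last-three slice.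
import Mathlib
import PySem

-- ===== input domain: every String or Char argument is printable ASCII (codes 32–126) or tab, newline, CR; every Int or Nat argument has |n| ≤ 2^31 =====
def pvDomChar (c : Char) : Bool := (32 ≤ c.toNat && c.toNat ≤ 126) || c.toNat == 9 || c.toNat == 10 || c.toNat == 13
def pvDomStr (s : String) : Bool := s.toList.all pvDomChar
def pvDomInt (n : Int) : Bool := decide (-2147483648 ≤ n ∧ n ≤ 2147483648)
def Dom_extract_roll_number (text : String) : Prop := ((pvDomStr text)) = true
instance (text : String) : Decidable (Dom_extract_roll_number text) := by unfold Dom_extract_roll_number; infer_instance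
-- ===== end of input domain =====

-- B replaces A's backward 3-bounded while-loop by one forward map/filter pass over the
-- prefix plus a last-three slice (objective: simpler). Same return value everywhere.

-- ===== PORT A =====
-- the replacement dict literal, shared by both Pythons
def pvRepl : PySem.Dict Char Char :=
  PySem.Dict.ofList [('O','0'),('o','0'),('Q','0'),('T','1'),('l','1'),('I','1'),('F','7')]

-- A's while-loop: n = i + 1 (n = 0 ↔ i < 0), digits is the accumulator list
def pvLoopA (cs : List Char) : Nat → List Char → List Char
  | 0, digits => digits
  | Nat.succ m, digits =>
    if 3 ≤ digits.length then digits
    else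
      let ch := PySem.List.pyGetD cs (m : Int) ' '   -- text[i]; i always in range here
      if ch = '.' then pvLoopA cs m digits
      else
        let ch' := pvRepl.getD ch ch
        if PySem.Chars.isdigit ch' then pvLoopA cs m (ch' :: digits)
        else pvLoopA cs m digits

def extract_roll_number (text : String) : Option String :=
  let idx := PySem.Str.find text "in words"
  if idx = -1 ∨ idx < 1 then none
  else
    let startIdx := idx - 1
    -- while starts at i = start_idx - 1, so fuel n = i + 1 = startIdx
    some (String.ofList (pvLoopA text.toList startIdx.toNat []))

-- ===== PORT B =====
def extract_roll_number_alt (text : String) : Option String :=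
  let idx := PySem.Str.find text "in words"
  if idx < 1 then none
  else
    let pre := PySem.List.slice text.toList none (some (idx - 1))     -- text[:idx-1]
    let digits := (pre.map (fun ch => pvRepl.getD ch ch)).filter PySem.Chars.isdigit
    some (String.ofList (PySem.List.slice digits (some (-3)) none))       -- digits[-3:]

-- ===== PRECONDITION & SPEC =====
def Spec_extract_roll_number (text : String) (out : Option String) : Prop := out = extract_roll_number_alt text
instance (text : String) (out : Option String) : Decidable (Spec_extract_roll_number text out) := by unfold Spec_extract_roll_number; infer_instance

-- ===== CLAIM (what is proved, stated in full; the proofs are below) =====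
def Claim_equal_extract_roll_number : Prop := ∀ (text : String), Dom_extract_roll_number text → Spec_extract_roll_number text (extract_roll_number text)

-- ===== LEMMAS AND PROOFS =====

-- A's backward scan collects exactly the last (3 - |digits|) kept digits of the first n chars
set_option maxRecDepth 4096 in
theorem pvLoopA_eq (cs : List Char) (n : Nat) (hn : n ≤ cs.length) (digits : List Char) :
    pvLoopA cs n digits =
      (((cs.take n).map (fun ch => pvRepl.getD ch ch)).filter PySem.Chars.isdigit).drop
        ((((cs.take n).map (fun ch => pvRepl.getD ch ch)).filter PySem.Chars.isdigit).length
          - (3 - digits.length)) ++ digits := by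
  induction n generalizing digits with
  | zero => simp [pvLoopA]
  | succ m ih =>
    have hm : m < cs.length := by omega
    by_cases h3 : 3 ≤ digits.length
    · have h0 : 3 - digits.length = 0 := by omega
      simp [pvLoopA, h3, h0]
    · have hget : PySem.List.pyGetD cs (m : Int) ' ' = cs[m] := by
        simp [PySem.List.pyGetD_natCast, List.getD_eq_getElem?_getD, hm]
      have htake : cs.take (m + 1) = cs.take m ++ [cs[m]] := by
        rw [List.take_add_one, List.getElem?_eq_getElem hm]; rfl
      have hsplit : ((cs.take (m+1)).map (fun ch => pvRepl.getD ch ch)).filter PySem.Chars.isdigit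
          = ((cs.take m).map (fun ch => pvRepl.getD ch ch)).filter PySem.Chars.isdigit
            ++ (if PySem.Chars.isdigit (pvRepl.getD cs[m] cs[m]) then [pvRepl.getD cs[m] cs[m]] else []) := by
        rw [htake, List.map_append, List.filter_append]
        simp only [List.map_cons, List.map_nil, List.filter_cons, List.filter_nil]
      rw [hsplit]
      set Fm := ((cs.take m).map (fun ch => pvRepl.getD ch ch)).filter PySem.Chars.isdigit with hFm
      by_cases hdig : PySem.Chars.isdigit (pvRepl.getD cs[m] cs[m]) = true
      · have hdot : cs[m] ≠ '.' := by
          intro h; rw [h] at hdig; exact absurd hdig (by decide)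
        simp only [pvLoopA, hget, if_neg h3, if_neg hdot, hdig, if_true]
        rw [ih (by omega) (pvRepl.getD cs[m] cs[m] :: digits)]
        have hidx : Fm.length + 1 - (3 - digits.length) ≤ Fm.length := by omega
        rw [List.drop_append_of_le_length (by simpa using hidx)]
        have heq : Fm.length + 1 - (3 - digits.length) = Fm.length - (3 - (digits.length + 1)) := by omega
        simp only [List.length_append, List.length_cons, List.length_nil] at heq ⊢
        rw [heq, List.append_assoc]
        rfl
      · have hdig' : PySem.Chars.isdigit (pvRepl.getD cs[m] cs[m]) = false := by
          simpa using hdig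
        have hnil : (if PySem.Chars.isdigit (pvRepl.getD cs[m] cs[m]) then [pvRepl.getD cs[m] cs[m]] else []) = ([] : List Char) := by
          simp [hdig']
        rw [hnil, List.append_nil]
        have hloop : pvLoopA cs (m+1) digits = pvLoopA cs m digits := by
          by_cases hdot : cs[m] = '.'
          · simp [pvLoopA, hget, h3, hdot]
          · simp [pvLoopA, hget, h3, hdot, hdig']
        rw [hloop]
        exact ih (by omega) digits

-- ===== VERDICT (by name: the statement is the Claim_ definition above) =====
theorem extract_roll_number_spec : Claim_equal_extract_roll_number := by
  intro text _
  unfold Spec_extract_roll_number extract_roll_number extract_roll_number_alt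
  simp only [PySem.Str.find_eq]
  set cs := text.toList with hcs
  set idx := PySem.Chars.find cs "in words".toList with hidx
  have hlb : -1 ≤ idx := PySem.Chars.neg_one_le_find cs _
  have hub : idx ≤ cs.length := PySem.Chars.find_le_length cs _
  by_cases hlt : idx < 1
  · simp [hlt]
  · have h1 : ¬ idx = -1 := by omega
    simp only [h1, hlt, or_self, if_false]
    have hsl : PySem.List.slice cs none (some (idx - 1)) = cs.take (idx - 1).toNat :=
      PySem.List.slice_to cs (by omega)
    have hn : (idx - 1).toNat ≤ cs.length := by omega
    rw [hsl]
    set F := ((cs.take (idx - 1).toNat).map (fun ch => pvRepl.getD ch ch)).filter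
      PySem.Chars.isdigit with hF
    rw [PySem.List.slice_from_neg_ofNat F 3 (by norm_num)]
    rw [pvLoopA_eq cs (idx - 1).toNat hn []]
    simp [hF]
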